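-- pv_equiv track=rewrite | github.com/ralamosm/wagifoeb | wagifoeb/api.py | recover
-- ===== SOURCE A (Python) =====
-- def gen_picture(w, h, colors=256):
--     square_size = 1
--     while True:
--         if (w // square_size) * (h // square_size) < colors:
--             break
--         square_size *= 2
--
--     if square_size == 1:
--         raise ValueError("picture size too small")
--
--     square_size //= 2
--     per_row = w // square_size
--     per_column = h // square_size
--
--     pict = []
--     for i in range(per_column):
--         line = []
--         for j in range(per_row):
--             color = (i * per_row + j) % colors
--             line.extend([color] * square_size)
--         line.extend([line[-1]] * (w - len(line)))
--         pict.extend([line] * square_size)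
--     pict.extend([pict[-1]] * (h - len(pict)))
--     return pict
--
-- def recover(pixels, colors=256):
--     palette_options = [[] for _ in range(colors)]
--     w = len(pixels[0])
--     h = len(pixels)
--     orig = gen_picture(w, h, colors)
--     for x in range(h):
--         for y in range(w):
--             palette_options[orig[x][y]].append(pixels[x][y])
--
--     palette = []
--     for opts in palette_options:
--         col = []
--         if not opts:
--             palette.append((None, None, None))
--             continue
--         cnts = {}
--         for c in opts:
--             cnts[c] = cnts.get(c, 0) + 1
--         elected = max(cnts, key=cnts.get)
--         col.extend(elected)
--         palette.append(tuple(col))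
--     return palette
-- ===== SOURCE B (Python) =====
-- def gen_picture(w, h, colors=256):
--     square_size = 1
--     while True:
--         if (w // square_size) * (h // square_size) < colors:
--             break
--         square_size *= 2
--
--     if square_size == 1:
--         raise ValueError("picture size too small")
--
--     square_size //= 2
--     per_row = w // square_size
--     per_column = h // square_size
--
--     pict = []
--     for i in range(per_column):
--         line = []
--         for j in range(per_row):
--             color = (i * per_row + j) % colors
--             line.extend([color] * square_size)
--         line.extend([line[-1]] * (w - len(line)))
--         pict.extend([line] * square_size)
--     pict.extend([pict[-1]] * (h - len(pict)))
--     return pict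
--
--
-- def recover(pixels, colors=256):
--     h = len(pixels)
--     w = len(pixels[0])
--     orig = gen_picture(w, h, colors)
--     reads = [(orig[x][y], pixels[x][y]) for x in range(h) for y in range(w)]
--     palette = []
--     for region in range(colors):
--         opts = [p for r, p in reads if r == region]
--         if not opts:
--             palette.append((None, None, None))
--             continue
--         uniq = []
--         for p in opts:
--             if p not in uniq:
--                 uniq.append(p)
--         palette.append(tuple(max(uniq, key=opts.count)))
--     return palette
-- ===== Notes on version B (the rewrite author's own statement) =====
-- stated objective: alternative
-- what changed: B replaces A's bucket-then-hash-count pipeline (distribute every pixel into per-region lists, then build a count dict per bucket and take its max key) by a flattened (region,pixel) read stream that is filtered per region, with the mode taken by max over the first-occurrence dedup list keyed by list.count - no dicts and no incremental buckets at all.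
import Mathlib
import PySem

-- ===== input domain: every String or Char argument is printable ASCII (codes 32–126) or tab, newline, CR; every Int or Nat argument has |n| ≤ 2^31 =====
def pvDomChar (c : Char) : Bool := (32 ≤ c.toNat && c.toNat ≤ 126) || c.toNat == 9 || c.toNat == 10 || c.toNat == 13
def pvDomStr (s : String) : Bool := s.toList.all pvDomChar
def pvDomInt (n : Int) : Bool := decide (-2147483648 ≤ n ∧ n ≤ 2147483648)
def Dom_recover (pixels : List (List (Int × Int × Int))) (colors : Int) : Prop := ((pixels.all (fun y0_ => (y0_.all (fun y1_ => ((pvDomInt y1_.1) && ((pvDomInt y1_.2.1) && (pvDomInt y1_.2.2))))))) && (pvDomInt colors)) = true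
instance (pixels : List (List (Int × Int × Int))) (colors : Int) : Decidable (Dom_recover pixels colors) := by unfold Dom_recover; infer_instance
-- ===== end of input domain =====

-- B flattens all (region, pixel) reads into one stream and, per region, takes the mode of the
-- filtered stream by max over its first-occurrence dedup list keyed by list.count — no buckets,
-- no dicts (objective: alternative).

-- ===== PORT A =====
-- shared helper gen_picture (both Pythons define it verbatim); the while loop gets fuel,
-- ample under Pre_ (Python diverges for colors < 1, excluded by Pre_)
def findSquare (w h colors : Int) : Nat → Int → Int
  | 0, s => s
  | fuel + 1, s =>
    if (PySem.Int.floordiv w s) * (PySem.Int.floordiv h s) < colors then s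
    else findSquare w h colors fuel (s * 2)

def genPicture (w h colors : Int) : List (List Int) :=
  let square_size0 := findSquare w h colors (w.toNat + h.toNat + 66) 1
  -- square_size0 = 1 is Python's ValueError, excluded by Pre_
  let square_size := PySem.Int.floordiv square_size0 2
  let per_row := PySem.Int.floordiv w square_size
  let per_column := PySem.Int.floordiv h square_size
  let pict := (PySem.List.pyRange 0 per_column 1).foldl (fun pict i =>
    let line := (PySem.List.pyRange 0 per_row 1).foldl (fun line j =>
      line ++ List.replicate square_size.toNat (PySem.Int.mod (i * per_row + j) colors)) []
    let line := line ++ List.replicate (w - (line.length : Int)).toNat (PySem.List.pyGetD line (-1) 0)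
    pict ++ List.replicate square_size.toNat line) []
  pict ++ List.replicate (h - (pict.length : Int)).toNat (PySem.List.pyGetD pict (-1) [])

def recover (pixels : List (List (Int × Int × Int))) (colors : Int) : List (Option Int × Option Int × Option Int) :=
  let palette_options : List (List (Int × Int × Int)) :=
    (PySem.List.pyRange 0 colors 1).map (fun _ => ([] : List (Int × Int × Int)))
  let w : Int := ((PySem.List.pyGetD pixels 0 []).length : Int)  -- pixels[0]: Pre_ excludes pixels = []
  let h : Int := (pixels.length : Int)
  let orig := genPicture w h colors
  let po := (PySem.List.pyRange 0 h 1).foldl (fun po x =>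
    (PySem.List.pyRange 0 w 1).foldl (fun po y =>
      let r := PySem.List.pyGetD (PySem.List.pyGetD orig x []) y 0
      let p := PySem.List.pyGetD (PySem.List.pyGetD pixels x []) y (0, 0, 0)
      PySem.List.pySetD po r (PySem.List.pyGetD po r [] ++ [p])) po) palette_options
  po.foldl (fun palette opts =>
    if opts = [] then palette ++ [(none, none, none)]
    else
      let cnts := opts.foldl
        (fun d c => PySem.Dict.insert d c (PySem.Dict.getD d c 0 + 1)) (PySem.Dict.empty : PySem.Dict (Int × Int × Int) Int)
      match PySem.List.max? cnts.keys (fun k => PySem.Dict.getD cnts k 0) with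
      | some e => palette ++ [(some e.1, some e.2.1, some e.2.2)]
      | none => palette ++ [(none, none, none)]) []

-- ===== PORT B =====
def recover_alt (pixels : List (List (Int × Int × Int))) (colors : Int) : List (Option Int × Option Int × Option Int) :=
  let h : Int := (pixels.length : Int)
  let w : Int := ((PySem.List.pyGetD pixels 0 []).length : Int)  -- pixels[0]: Pre_ excludes pixels = []
  let orig := genPicture w h colors
  let reads : List (Int × (Int × Int × Int)) :=
    (PySem.List.pyRange 0 h 1).flatMap (fun x => (PySem.List.pyRange 0 w 1).map (fun y =>
      (PySem.List.pyGetD (PySem.List.pyGetD orig x []) y 0,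
       PySem.List.pyGetD (PySem.List.pyGetD pixels x []) y (0, 0, 0))))
  (PySem.List.pyRange 0 colors 1).foldl (fun palette region =>
    let opts := (reads.filter (fun q => q.1 == region)).map (·.2)
    if opts = [] then palette ++ [(none, none, none)]
    else
      let uniq := opts.foldl (fun u p => if p ∈ u then u else u ++ [p]) []
      match PySem.List.max? uniq (fun k => (PySem.List.count opts k : Int)) with
      | some e => palette ++ [(some e.1, some e.2.1, some e.2.2)]
      | none => palette ++ [(none, none, none)]) []

-- ===== PRECONDITION & SPEC =====
-- Pre_: exactly where Python A returns — pixels nonempty, every row at least as long as row 0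
-- (else IndexError in pixels[x][y]), 1 ≤ colors (Python loops forever for colors < 1) and
-- colors ≤ w*h (else gen_picture raises ValueError).
def Pre_recover (pixels : List (List (Int × Int × Int))) (colors : Int) : Prop :=
  pixels ≠ [] ∧ 1 ≤ colors ∧
  colors ≤ ((pixels.headD []).length : Int) * (pixels.length : Int) ∧
  ∀ row ∈ pixels, (pixels.headD []).length ≤ row.length
instance (pixels : List (List (Int × Int × Int))) (colors : Int) : Decidable (Pre_recover pixels colors) := by
  unfold Pre_recover; infer_instance

def pvWitness_recover : (List (List (Int × Int × Int))) × Int :=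
  ([[(1, 2, 3), (4, 5, 6)], [(1, 2, 3), (7, 8, 9)]], 2)

def Spec_recover (pixels : List (List (Int × Int × Int))) (colors : Int) (out : List (Option Int × Option Int × Option Int)) : Prop := out = recover_alt pixels colors
instance (pixels : List (List (Int × Int × Int))) (colors : Int) (out : List (Option Int × Option Int × Option Int)) : Decidable (Spec_recover pixels colors out) := by unfold Spec_recover; infer_instance

-- ===== CLAIM (what is proved, stated in full; the proofs are below) =====
def Claim_equal_recover : Prop := ∀ (pixels : List (List (Int × Int × Int))) (colors : Int), Dom_recover pixels colors → Pre_recover pixels colors → Spec_recover pixels colors (recover pixels colors)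

-- ===== LEMMAS AND PROOFS =====

-- the stream of (region, pixel) reads, in scan order (B's 'reads' list; A reads the same stream)
def pvReads (orig : List (List Int)) (pixels : List (List (Int × Int × Int))) (w h : Int) :
    List (Int × (Int × Int × Int)) :=
  (PySem.List.pyRange 0 h 1).flatMap (fun x => (PySem.List.pyRange 0 w 1).map (fun y =>
    (PySem.List.pyGetD (PySem.List.pyGetD orig x []) y 0,
     PySem.List.pyGetD (PySem.List.pyGetD pixels x []) y (0, 0, 0))))

def pvStepA (po : List (List (Int × Int × Int))) (q : Int × (Int × Int × Int)) :
    List (List (Int × Int × Int)) :=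
  PySem.List.pySetD po q.1 (PySem.List.pyGetD po q.1 [] ++ [q.2])

def pvBucket (ps : List (Int × (Int × Int × Int))) (r : Int) : List (Int × Int × Int) :=
  (ps.filter (fun q => q.1 == r)).map (·.2)

def pvOutA (opts : List (Int × Int × Int)) : Option Int × Option Int × Option Int :=
  if opts = [] then (none, none, none)
  else
    match PySem.List.max?
        (opts.foldl (fun d c => PySem.Dict.insert d c (PySem.Dict.getD d c 0 + 1)) (PySem.Dict.empty : PySem.Dict (Int × Int × Int) Int)).keys
        (fun k => PySem.Dict.getD
          (opts.foldl (fun d c => PySem.Dict.insert d c (PySem.Dict.getD d c 0 + 1)) (PySem.Dict.empty : PySem.Dict (Int × Int × Int) Int)) k 0) with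
    | some e => (some e.1, some e.2.1, some e.2.2)
    | none => (none, none, none)

def pvOutB (opts : List (Int × Int × Int)) : Option Int × Option Int × Option Int :=
  if opts = [] then (none, none, none)
  else
    match PySem.List.max? (opts.foldl (fun u p => if p ∈ u then u else u ++ [p]) [])
        (fun k => (PySem.List.count opts k : Int)) with
    | some e => (some e.1, some e.2.1, some e.2.2)
    | none => (none, none, none)

-- A's nested scan is a fold of its step over the read stream
theorem pvScanA (orig : List (List Int)) (pixels : List (List (Int × Int × Int))) (w h : Int)
    (po0 : List (List (Int × Int × Int))) :
    (PySem.List.pyRange 0 h 1).foldl (fun po x =>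
      (PySem.List.pyRange 0 w 1).foldl (fun po y =>
        PySem.List.pySetD po (PySem.List.pyGetD (PySem.List.pyGetD orig x []) y 0)
          (PySem.List.pyGetD po (PySem.List.pyGetD (PySem.List.pyGetD orig x []) y 0) [] ++
            [PySem.List.pyGetD (PySem.List.pyGetD pixels x []) y (0, 0, 0)])) po) po0
      = (pvReads orig pixels w h).foldl pvStepA po0 := by
  simp [pvReads, List.foldl_flatMap, List.foldl_map, pvStepA]

-- A's scan, bucket by bucket
theorem pvAFold (ps : List (Int × (Int × Int × Int))) (hnn : ∀ q ∈ ps, 0 ≤ q.1) :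
    ∀ (po : List (List (Int × Int × Int))) (i : Nat),
      (ps.foldl pvStepA po)[i]? = po[i]?.map (fun l => l ++ pvBucket ps (i : Int)) := by
  induction ps with
  | nil => intro po i; simp [pvBucket]
  | cons q t ih =>
    intro po i
    obtain ⟨r, p⟩ := q
    have hr : 0 ≤ r := hnn (r, p) (List.mem_cons_self)
    have hnt : ∀ q ∈ t, 0 ≤ q.1 := fun q hq => hnn q (List.mem_cons_of_mem _ hq)
    have hbk : ∀ x : Int, pvBucket ((r, p) :: t) x
        = if r = x then p :: pvBucket t x else pvBucket t x := by
      intro x; by_cases h : r = x <;> simp [pvBucket, h]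
    simp only [List.foldl_cons]
    rw [ih hnt, hbk]
    simp only [pvStepA, PySem.List.pySetD_of_nonneg po _ hr]
    by_cases hri : r = (i : Int)
    · subst hri
      simp only [Int.toNat_natCast]
      by_cases hlen : i < po.length
      · rw [List.getElem?_set_self hlen]
        have hget : PySem.List.pyGetD po (i : Int) [] = po[i] :=
          PySem.List.pyGetD_eq_getElem po [] (by omega) (by exact_mod_cast hlen) |>.trans (by simp)
        rw [hget, List.getElem?_eq_getElem hlen]
        simp
      · have hle : po.length ≤ i := Nat.le_of_not_lt hlen
        rw [List.getElem?_eq_none (by simpa using hle), List.getElem?_eq_none hle]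
        simp
    · have htn : r.toNat ≠ i := by omega
      rw [List.getElem?_set_ne htn]
      simp [hri]

theorem pvGetD_mem_or {α : Type} (xs : List α) (i : Int) (d : α) :
    PySem.List.pyGetD xs i d ∈ xs ∨ PySem.List.pyGetD xs i d = d := by
  cases h : PySem.List.pyGet? xs i with
  | none => right; simp [PySem.List.pyGetD, h]
  | some a =>
      left
      have := PySem.List.mem_of_pyGet?_eq_some (h := h)
      simpa [PySem.List.pyGetD, h] using this

theorem pvFoldlPres {α σ : Type} (Q : σ → Prop) (f : σ → α → σ) (l : List α)
    (h : ∀ s x, Q s → Q (f s x)) : ∀ init, Q init → Q (l.foldl f init) := by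
  induction l with
  | nil => intro init h0; exact h0
  | cons x t ih => intro init h0; exact ih _ (h _ _ h0)

theorem pvGenNonneg (w h colors : Int) (hc : 1 ≤ colors) :
    ∀ row ∈ genPicture w h colors, ∀ v ∈ row, 0 ≤ v := by
  simp only [genPicture]
  intro row hrow
  have hbase : ∀ row ∈ (PySem.List.pyRange 0 (PySem.Int.floordiv h (PySem.Int.floordiv (findSquare w h colors (w.toNat + h.toNat + 66) 1) 2)) 1).foldl
      (fun pict i =>
        pict ++ List.replicate (PySem.Int.floordiv (findSquare w h colors (w.toNat + h.toNat + 66) 1) 2).toNat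
          ((PySem.List.pyRange 0 (PySem.Int.floordiv w (PySem.Int.floordiv (findSquare w h colors (w.toNat + h.toNat + 66) 1) 2)) 1).foldl
            (fun line j => line ++ List.replicate (PySem.Int.floordiv (findSquare w h colors (w.toNat + h.toNat + 66) 1) 2).toNat
              (PySem.Int.mod (i * PySem.Int.floordiv w (PySem.Int.floordiv (findSquare w h colors (w.toNat + h.toNat + 66) 1) 2) + j) colors)) []
            ++ List.replicate (w - (((PySem.List.pyRange 0 (PySem.Int.floordiv w (PySem.Int.floordiv (findSquare w h colors (w.toNat + h.toNat + 66) 1) 2)) 1).foldl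
                (fun line j => line ++ List.replicate (PySem.Int.floordiv (findSquare w h colors (w.toNat + h.toNat + 66) 1) 2).toNat
                  (PySem.Int.mod (i * PySem.Int.floordiv w (PySem.Int.floordiv (findSquare w h colors (w.toNat + h.toNat + 66) 1) 2) + j) colors)) []).length : Int)).toNat
              (PySem.List.pyGetD ((PySem.List.pyRange 0 (PySem.Int.floordiv w (PySem.Int.floordiv (findSquare w h colors (w.toNat + h.toNat + 66) 1) 2)) 1).foldl
                (fun line j => line ++ List.replicate (PySem.Int.floordiv (findSquare w h colors (w.toNat + h.toNat + 66) 1) 2).toNat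
                  (PySem.Int.mod (i * PySem.Int.floordiv w (PySem.Int.floordiv (findSquare w h colors (w.toNat + h.toNat + 66) 1) 2) + j) colors)) []) (-1) 0))) [],
      ∀ v ∈ row, 0 ≤ v := by
    apply pvFoldlPres (Q := fun s => ∀ r ∈ s, ∀ v ∈ r, 0 ≤ v)
    · intro s i hQ r hr
      rcases List.mem_append.1 hr with hs | hrep
      · exact hQ r hs
      · have hline := List.eq_of_mem_replicate hrep
        subst hline
        intro v hv
        have hlineb : ∀ v ∈ (PySem.List.pyRange 0 (PySem.Int.floordiv w (PySem.Int.floordiv (findSquare w h colors (w.toNat + h.toNat + 66) 1) 2)) 1).foldl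
            (fun line j => line ++ List.replicate (PySem.Int.floordiv (findSquare w h colors (w.toNat + h.toNat + 66) 1) 2).toNat
              (PySem.Int.mod (i * PySem.Int.floordiv w (PySem.Int.floordiv (findSquare w h colors (w.toNat + h.toNat + 66) 1) 2) + j) colors)) [],
            0 ≤ v := by
          apply pvFoldlPres (Q := fun l => ∀ v ∈ l, 0 ≤ v)
          · intro l j hQl v hv
            rcases List.mem_append.1 hv with hl | hrep2
            · exact hQl v hl
            · rw [List.eq_of_mem_replicate hrep2]
              exact PySem.Int.mod_nonneg _ (by omega)
          · simp
        rcases List.mem_append.1 hv with hl | hrep2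
        · exact hlineb v hl
        · rw [List.eq_of_mem_replicate hrep2]
          rcases pvGetD_mem_or _ (-1) (0 : Int) with hmem | hd
          · exact hlineb _ hmem
          · rw [hd]
    · simp
  rcases List.mem_append.1 hrow with hb | hrep
  · exact hbase row hb
  · rw [List.eq_of_mem_replicate hrep]
    rcases pvGetD_mem_or _ (-1) ([] : List Int) with hmem | hd
    · exact hbase _ hmem
    · rw [hd]; simp

theorem pvReadsNonneg (w h colors : Int) (hc : 1 ≤ colors)
    (pixels : List (List (Int × Int × Int))) :
    ∀ q ∈ pvReads (genPicture w h colors) pixels w h, 0 ≤ q.1 := by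
  intro q hq
  simp only [pvReads, List.mem_flatMap, List.mem_map] at hq
  obtain ⟨x, _, y, _, rfl⟩ := hq
  rcases pvGetD_mem_or (PySem.List.pyGetD (genPicture w h colors) x []) y (0 : Int) with hmem | hd
  · rcases pvGetD_mem_or (genPicture w h colors) x ([] : List Int) with hrow | hrow
    · exact pvGenNonneg w h colors hc _ hrow _ hmem
    · rw [hrow] at hmem; simp at hmem
  · simp [hd]

-- A's final loop is a map of pvOutA
theorem pvStepAeq (acc : List (Option Int × Option Int × Option Int))
    (opts : List (Int × Int × Int)) :
    (if opts = [] then acc ++ [((none : Option Int), (none : Option Int), (none : Option Int))]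
      else
        match PySem.List.max?
            (opts.foldl (fun d c => PySem.Dict.insert d c (PySem.Dict.getD d c 0 + 1)) (PySem.Dict.empty : PySem.Dict (Int × Int × Int) Int)).keys
            (fun k => PySem.Dict.getD
              (opts.foldl (fun d c => PySem.Dict.insert d c (PySem.Dict.getD d c 0 + 1)) (PySem.Dict.empty : PySem.Dict (Int × Int × Int) Int)) k 0) with
        | some e => acc ++ [(some e.1, some e.2.1, some e.2.2)]
        | none => acc ++ [(none, none, none)]) = acc ++ [pvOutA opts] := by
  by_cases h0 : opts = []
  · simp [h0, pvOutA]
  · simp only [h0, if_false, pvOutA]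
    cases hm : PySem.List.max?
        (opts.foldl (fun d c => PySem.Dict.insert d c (PySem.Dict.getD d c 0 + 1)) (PySem.Dict.empty : PySem.Dict (Int × Int × Int) Int)).keys
        (fun k => PySem.Dict.getD
          (opts.foldl (fun d c => PySem.Dict.insert d c (PySem.Dict.getD d c 0 + 1)) (PySem.Dict.empty : PySem.Dict (Int × Int × Int) Int)) k 0) <;>
      simp_all

theorem pvFinalA (po : List (List (Int × Int × Int))) :
    po.foldl (fun palette opts =>
      if opts = [] then palette ++ [((none : Option Int), (none : Option Int), (none : Option Int))]
      else
        match PySem.List.max?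
            (opts.foldl (fun d c => PySem.Dict.insert d c (PySem.Dict.getD d c 0 + 1)) (PySem.Dict.empty : PySem.Dict (Int × Int × Int) Int)).keys
            (fun k => PySem.Dict.getD
              (opts.foldl (fun d c => PySem.Dict.insert d c (PySem.Dict.getD d c 0 + 1)) (PySem.Dict.empty : PySem.Dict (Int × Int × Int) Int)) k 0) with
        | some e => palette ++ [(some e.1, some e.2.1, some e.2.2)]
        | none => palette ++ [(none, none, none)]) []
    = po.map pvOutA := by
  refine (PySem.List.foldl_congr_mem po _ (fun acc opts => acc ++ [pvOutA opts]) [] ?_).trans ?_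
  · intro acc x _; exact pvStepAeq acc x
  · simpa using PySem.List.foldl_append_singleton_eq_map pvOutA po []

-- B's final loop is a map of pvOutB over the buckets
theorem pvFinalB (reads : List (Int × (Int × Int × Int))) (colors : Int) :
    (PySem.List.pyRange 0 colors 1).foldl (fun palette region =>
      if (reads.filter (fun q => q.1 == region)).map (·.2) = [] then
        palette ++ [((none : Option Int), (none : Option Int), (none : Option Int))]
      else
        match PySem.List.max?
            (((reads.filter (fun q => q.1 == region)).map (·.2)).foldl (fun u p => if p ∈ u then u else u ++ [p]) [])
            (fun k => (PySem.List.count ((reads.filter (fun q => q.1 == region)).map (·.2)) k : Int)) with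
        | some e => palette ++ [(some e.1, some e.2.1, some e.2.2)]
        | none => palette ++ [(none, none, none)]) []
    = (PySem.List.pyRange 0 colors 1).map (fun region => pvOutB (pvBucket reads region)) := by
  refine (PySem.List.foldl_congr_mem _ _ (fun acc region => acc ++ [pvOutB (pvBucket reads region)]) [] ?_).trans ?_
  · intro acc r _
    by_cases h0 : (reads.filter (fun q => q.1 == r)).map (·.2) = []
    · simp [h0, pvOutB, pvBucket]
    · simp only [h0, if_false, pvOutB, pvBucket]
      cases hm : PySem.List.max?
          (((reads.filter (fun q => q.1 == r)).map (·.2)).foldl (fun u p => if p ∈ u then u else u ++ [p]) [])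
          (fun k => (PySem.List.count ((reads.filter (fun q => q.1 == r)).map (·.2)) k : Int)) <;> simp_all
  · simpa using PySem.List.foldl_append_singleton_eq_map (fun region => pvOutB (pvBucket reads region)) (PySem.List.pyRange 0 colors 1) []

-- mode by hash counting = mode by dedup + list.count (same first-occurrence tie-break)
theorem pvOutAB (opts : List (Int × Int × Int)) : pvOutA opts = pvOutB opts := by
  unfold pvOutA pvOutB
  by_cases h0 : opts = []
  · simp [h0]
  · simp only [h0, if_false]
    rw [PySem.Dict.foldl_insert_getD_add_one_eq_counter, PySem.Dict.keys_counter]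
    have huniq : opts.foldl (fun u p => if p ∈ u then u else u ++ [p]) [] = PySem.Set.ofList opts := by
      rw [PySem.Set.ofList_eq_foldl]
      refine PySem.List.foldl_congr_mem opts _ _ [] ?_
      intro acc x _
      rw [PySem.Set.add_eq_ite]
    rw [huniq]
    have hkey : (fun k => PySem.Dict.getD (PySem.Dict.counter opts) k 0)
        = (fun k => (PySem.List.count opts k : Int)) := by
      funext k
      rw [PySem.Dict.getD_counter]
      simp [PySem.List.count]
    rw [hkey]

theorem pvPoEq (ps : List (Int × (Int × Int × Int))) (hnn : ∀ q ∈ ps, 0 ≤ q.1) (n : Nat) :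
    ps.foldl pvStepA ((List.range n).map (fun _ => ([] : List (Int × Int × Int))))
      = (List.range n).map (fun i : Nat => pvBucket ps (i : Int)) := by
  apply List.ext_getElem?
  intro i
  rw [pvAFold ps hnn]
  by_cases hi : i < n <;>
    simp [hi, List.getElem_range]

theorem pvMainCore (ps : List (Int × (Int × Int × Int))) (hnn : ∀ q ∈ ps, 0 ≤ q.1) (colors : Int) :
    (ps.foldl pvStepA ((PySem.List.pyRange 0 colors 1).map (fun _ => ([] : List (Int × Int × Int))))).map pvOutA
      = (PySem.List.pyRange 0 colors 1).map (fun region => pvOutB (pvBucket ps region)) := by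
  rw [PySem.List.pyRange_one]
  simp only [List.map_map, Int.sub_zero]
  rw [show ((fun (_ : Int) => ([] : List (Int × Int × Int))) ∘ fun (k : Nat) => (0 : Int) + (k : Int))
      = (fun (_ : Nat) => ([] : List (Int × Int × Int))) from rfl]
  rw [pvPoEq ps hnn colors.toNat, List.map_map]
  apply List.map_congr_left
  intro i _
  show pvOutA (pvBucket ps (i : Int)) = pvOutB (pvBucket ps ((0 : Int) + (i : Int)))
  rw [zero_add]
  exact pvOutAB (pvBucket ps (i : Int))

-- ===== VERDICT (by name: the statement is the Claim_ definition above) =====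
theorem recover_spec : Claim_equal_recover := by
  intro pixels colors hdom hpre
  unfold Spec_recover
  obtain ⟨hne, hc, hwh, hrows⟩ := hpre
  simp only [recover, recover_alt]
  rw [pvScanA, pvFinalA, pvFinalB]
  exact pvMainCore _ (pvReadsNonneg _ _ _ hc _) _
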